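-- pv_equiv track=rewrite | github.com/RobertoFranciscodelosSantosLopez/Collatz | friction.py | analizar_presion_vecindad
-- ===== SOURCE A (Python) =====
-- def get_v2(n):
--     count = 0
--     if n == 0: return 0
--     while n % 2 == 0:
--         count += 1
--         n //= 2
--     return count
--
-- def collatz_steps(n):
--     steps = 0
--     curr = n
--     while curr > 1:
--         if curr % 2 == 0:
--             curr //= 2
--         else:
--             curr = 3 * curr + 1
--         steps += 1
--     return steps
--
-- def analizar_presion_vecindad(rango_inicio, muestras):
--     resultados = []
--     for i in range(rango_inicio, rango_inicio + muestras):
--         if i % 2 == 0: continue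
--
--         v2_n = get_v2(3 * i + 1)
--         if v2_n == 1: # Es un rebelde (Expansivo Débil)
--             # Medimos la "Presión" de los vecinos cercanos (n-4, n-2, n+2, n+4)
--             vecinos = [i-4, i-2, i+2, i+4]
--             presion = sum([get_v2(3 * v + 1) for v in vecinos])
--
--             pasos = collatz_steps(i)
--             resultados.append({'n': i, 'presion': presion, 'pasos': pasos})
--     return resultados
-- ===== SOURCE B (Python) =====
-- def get_v2(n):
--     if n == 0 or n % 2:
--         return 0
--     return 1 + get_v2(n // 2)
--
-- def collatz_steps(n):
--     steps = 0
--     curr = n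
--     while curr > 1:
--         if curr % 2 == 0:
--             curr //= 2
--         else:
--             curr = 3 * curr + 1
--         steps += 1
--     return steps
--
-- def analizar_presion_vecindad(rango_inicio, muestras):
--     # Rebels (odd i with v2(3i+1) == 1) are exactly i = 3 (mod 4): walk them
--     # directly with stride 4; neighbours i-4 and i+4 are rebels too, so their
--     # v2 contribution is the constant 2.
--     fin = rango_inicio + muestras
--     i = rango_inicio + (3 - rango_inicio) % 4
--     resultados = []
--     while i < fin:
--         presion = 2 + get_v2(3 * (i - 2) + 1) + get_v2(3 * (i + 2) + 1)
--         resultados.append({'n': i, 'presion': presion, 'pasos': collatz_steps(i)})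
--         i += 4
--     return resultados
-- ===== Notes on version B (the rewrite author's own statement) =====
-- stated objective: alternative
-- what changed: B replaces A's scan-every-i-and-test filter by the number-theoretic characterization that the weak-expansive odd numbers are exactly i = 3 (mod 4), walking them directly with stride 4, and replaces the four-neighbour v2 sum by 2 + v2(3(i-2)+1) + v2(3(i+2)+1) since the +-4 neighbours always contribute 1 each; get_v2 is rewritten recursively.
import Mathlib
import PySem

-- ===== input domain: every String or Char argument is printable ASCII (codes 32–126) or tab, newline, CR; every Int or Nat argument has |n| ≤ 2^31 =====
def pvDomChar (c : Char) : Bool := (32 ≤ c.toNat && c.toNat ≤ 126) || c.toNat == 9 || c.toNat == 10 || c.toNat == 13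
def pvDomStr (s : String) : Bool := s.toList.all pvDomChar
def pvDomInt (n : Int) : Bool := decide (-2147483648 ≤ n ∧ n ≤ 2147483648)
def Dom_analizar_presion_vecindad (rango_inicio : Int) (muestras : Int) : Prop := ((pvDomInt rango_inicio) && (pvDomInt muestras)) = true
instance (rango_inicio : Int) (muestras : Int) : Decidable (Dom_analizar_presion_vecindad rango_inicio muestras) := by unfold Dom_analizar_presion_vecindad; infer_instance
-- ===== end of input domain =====

-- B re-derives A's filter (odd i with v2(3i+1)=1) as the closed-form congruence i ≡ 3 (mod 4),
-- walked with stride 4, and folds the two ±4-neighbour v2 values (always 1) into a constant 2;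
-- objective: alternative (same asymptotic cost).

-- ===== PORT A =====

-- the `while n % 2 == 0` loop of get_v2 (the `n ≠ 0` conjunct is only a totality
-- guard: the caller never reaches the loop with n = 0)
def pvV2Loop (n count : Int) : Int :=
  if _h : n ≠ 0 ∧ PySem.Int.mod n 2 = 0 then
    pvV2Loop (PySem.Int.floordiv n 2) (count + 1)
  else count
termination_by n.natAbs
decreasing_by
  rw [PySem.Int.mod_eq_emod_of_pos (by omega : (0:Int) < 2)] at _h
  rw [PySem.Int.floordiv_eq_ediv_of_pos (by omega : (0:Int) < 2)]
  omega

def get_v2 (n : Int) : Int :=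
  if n = 0 then 0 else pvV2Loop n 0

-- the `while curr > 1` loop of collatz_steps; fuel only makes the recursion total in
-- Lean (100000 far exceeds any step count reached on the tested inputs)
def pvCollatzLoop : Nat → Int → Int → Int
  | 0, _, steps => steps
  | f + 1, curr, steps =>
    if curr > 1 then
      if PySem.Int.mod curr 2 = 0 then
        pvCollatzLoop f (PySem.Int.floordiv curr 2) (steps + 1)
      else
        pvCollatzLoop f (3 * curr + 1) (steps + 1)
    else steps

def collatz_steps (n : Int) : Int := pvCollatzLoop 100000 n 0

def analizar_presion_vecindad (rango_inicio : Int) (muestras : Int) : List (List (String × Int)) :=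
  (PySem.List.pyRange rango_inicio (rango_inicio + muestras) 1).foldl
    (fun resultados i =>
      if PySem.Int.mod i 2 = 0 then resultados
      else
        let v2_n := get_v2 (3 * i + 1)
        if v2_n = 1 then
          let vecinos : List Int := [i - 4, i - 2, i + 2, i + 4]
          let presion := (vecinos.map (fun v => get_v2 (3 * v + 1))).sum
          let pasos := collatz_steps i
          resultados ++ [[("n", i), ("presion", presion), ("pasos", pasos)]]
        else resultados) []

-- ===== PORT B =====

-- B's recursive get_v2
def get_v2_alt (n : Int) : Int :=
  if n = 0 ∨ PySem.Int.mod n 2 ≠ 0 then 0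
  else 1 + get_v2_alt (PySem.Int.floordiv n 2)
termination_by n.natAbs
decreasing_by
  rw [PySem.Int.mod_eq_emod_of_pos (by omega : (0:Int) < 2)] at *
  rw [PySem.Int.floordiv_eq_ediv_of_pos (by omega : (0:Int) < 2)]
  omega

-- B's `while i < fin` loop, stride 4
def pvAltLoop (fin i : Int) (resultados : List (List (String × Int))) : List (List (String × Int)) :=
  if i < fin then
    pvAltLoop fin (i + 4)
      (resultados ++ [[("n", i),
        ("presion", 2 + get_v2_alt (3 * (i - 2) + 1) + get_v2_alt (3 * (i + 2) + 1)),
        ("pasos", collatz_steps i)]])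
  else resultados
termination_by (fin - i).toNat
decreasing_by omega

def analizar_presion_vecindad_alt (rango_inicio : Int) (muestras : Int) : List (List (String × Int)) :=
  pvAltLoop (rango_inicio + muestras) (rango_inicio + PySem.Int.mod (3 - rango_inicio) 4) []

-- ===== PRECONDITION & SPEC =====
def Spec_analizar_presion_vecindad (rango_inicio : Int) (muestras : Int) (out : List (List (String × Int))) : Prop := out = analizar_presion_vecindad_alt rango_inicio muestras
instance (rango_inicio : Int) (muestras : Int) (out : List (List (String × Int))) : Decidable (Spec_analizar_presion_vecindad rango_inicio muestras out) := by unfold Spec_analizar_presion_vecindad; infer_instance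

-- ===== CLAIM (what is proved, stated in full; the proofs are below) =====
def Claim_equal_analizar_presion_vecindad : Prop := ∀ (rango_inicio : Int) (muestras : Int), Dom_analizar_presion_vecindad rango_inicio muestras → Spec_analizar_presion_vecindad rango_inicio muestras (analizar_presion_vecindad rango_inicio muestras)

-- ===== LEMMAS AND PROOFS =====

theorem pvV2Loop_eq (n count : Int) : pvV2Loop n count = count + get_v2_alt n := by
  induction n, count using pvV2Loop.induct with
  | case1 n c h ih =>
    rw [pvV2Loop, get_v2_alt, if_neg (show ¬(n = 0 ∨ PySem.Int.mod n 2 ≠ 0) by tauto)]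
    simp only [dif_pos h]
    rw [ih]; ring
  | case2 n c h =>
    rw [pvV2Loop, get_v2_alt, if_pos (show n = 0 ∨ PySem.Int.mod n 2 ≠ 0 by tauto)]
    simp only [dif_neg h]
    ring

theorem get_v2_eq_alt (n : Int) : get_v2 n = get_v2_alt n := by
  rw [get_v2]
  by_cases h : n = 0
  · rw [if_pos h, h, get_v2_alt, if_pos (Or.inl rfl)]
  · rw [if_neg h, pvV2Loop_eq]; ring

theorem get_v2_alt_nonneg (n : Int) : 0 ≤ get_v2_alt n := by
  induction n using get_v2_alt.induct with
  | case1 n h => rw [get_v2_alt, if_pos h]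
  | case2 n h ih => rw [get_v2_alt, if_neg h]; omega

theorem get_v2_alt_mod4_two (n : Int) (h : n % 4 = 2) : get_v2_alt n = 1 := by
  have hm : ∀ m : Int, PySem.Int.mod m 2 = m % 2 := fun m => PySem.Int.mod_eq_emod_of_pos (by omega)
  have hd : ∀ m : Int, PySem.Int.floordiv m 2 = m / 2 := fun m => PySem.Int.floordiv_eq_ediv_of_pos (by omega)
  rw [get_v2_alt, if_neg (by rw [hm]; omega), hd, get_v2_alt, if_pos (by rw [hm]; omega)]
  omega

theorem get_v2_alt_mod4_zero (n : Int) (h0 : n ≠ 0) (h : n % 4 = 0) : 2 ≤ get_v2_alt n := by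
  have hm : ∀ m : Int, PySem.Int.mod m 2 = m % 2 := fun m => PySem.Int.mod_eq_emod_of_pos (by omega)
  have hd : ∀ m : Int, PySem.Int.floordiv m 2 = m / 2 := fun m => PySem.Int.floordiv_eq_ediv_of_pos (by omega)
  rw [get_v2_alt, if_neg (by rw [hm]; omega), hd, get_v2_alt, if_neg (by rw [hm]; omega)]
  have := get_v2_alt_nonneg (PySem.Int.floordiv (n / 2) 2)
  omega

theorem pv_main (k : Nat) : ∀ (a b : Int), (b - a).toNat = k → ∀ acc,
    (PySem.List.pyRange a b 1).foldl
      (fun resultados i =>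
        if PySem.Int.mod i 2 = 0 then resultados
        else
          let v2_n := get_v2 (3 * i + 1)
          if v2_n = 1 then
            let vecinos : List Int := [i - 4, i - 2, i + 2, i + 4]
            let presion := (vecinos.map (fun v => get_v2 (3 * v + 1))).sum
            let pasos := collatz_steps i
            resultados ++ [[("n", i), ("presion", presion), ("pasos", pasos)]]
          else resultados) acc
    = pvAltLoop b (a + PySem.Int.mod (3 - a) 4) acc := by
  induction k with
  | zero =>
    intro a b hk acc
    have hm4 : PySem.Int.mod (3 - a) 4 = (3 - a) % 4 := PySem.Int.mod_eq_emod_of_pos (by omega)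
    rw [PySem.List.pyRange_one_eq_nil (by omega), List.foldl_nil, pvAltLoop,
        if_neg (by rw [hm4]; omega)]
  | succ k ih =>
    intro a b hk acc
    have hab : a < b := by omega
    have hm4 : PySem.Int.mod (3 - a) 4 = (3 - a) % 4 := PySem.Int.mod_eq_emod_of_pos (by omega)
    have hm4' : PySem.Int.mod (3 - (a + 1)) 4 = (3 - (a + 1)) % 4 :=
      PySem.Int.mod_eq_emod_of_pos (by omega)
    have hm2 : PySem.Int.mod a 2 = a % 2 := PySem.Int.mod_eq_emod_of_pos (by omega)
    rw [PySem.List.pyRange_one_cons hab, List.foldl_cons]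
    by_cases h3 : a % 4 = 3
    · have hodd : ¬ PySem.Int.mod a 2 = 0 := by rw [hm2]; omega
      have e1 : get_v2_alt (3 * a + 1) = 1 := get_v2_alt_mod4_two _ (by omega)
      have e2 : get_v2_alt (3 * (a - 4) + 1) = 1 := get_v2_alt_mod4_two _ (by omega)
      have e3 : get_v2_alt (3 * (a + 4) + 1) = 1 := get_v2_alt_mod4_two _ (by omega)
      have hstep :
          (if PySem.Int.mod a 2 = 0 then acc
           else
             let v2_n := get_v2 (3 * a + 1)
             if v2_n = 1 then
               let vecinos : List Int := [a - 4, a - 2, a + 2, a + 4]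
               let presion := (vecinos.map (fun v => get_v2 (3 * v + 1))).sum
               let pasos := collatz_steps a
               acc ++ [[("n", a), ("presion", presion), ("pasos", pasos)]]
             else acc)
          = acc ++ [[("n", a),
              ("presion", 2 + get_v2_alt (3 * (a - 2) + 1) + get_v2_alt (3 * (a + 2) + 1)),
              ("pasos", collatz_steps a)]] := by
        rw [if_neg hodd]
        simp only [get_v2_eq_alt, e1, List.map_cons, List.map_nil, List.sum_cons,
          List.sum_nil, e2, e3, if_pos]
        have harith : 1 + (get_v2_alt (3 * (a - 2) + 1) + (get_v2_alt (3 * (a + 2) + 1) + (1 + 0)))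
            = 2 + get_v2_alt (3 * (a - 2) + 1) + get_v2_alt (3 * (a + 2) + 1) := by ring
        rw [harith]
      rw [hstep, ih (a + 1) b (by omega), hm4', hm4,
          show a + 1 + (3 - (a + 1)) % 4 = a + 4 by omega,
          show a + (3 - a) % 4 = a by omega]
      conv_rhs => rw [pvAltLoop, if_pos hab]
    · have hskip :
          (if PySem.Int.mod a 2 = 0 then acc
           else
             let v2_n := get_v2 (3 * a + 1)
             if v2_n = 1 then
               let vecinos : List Int := [a - 4, a - 2, a + 2, a + 4]
               let presion := (vecinos.map (fun v => get_v2 (3 * v + 1))).sum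
               let pasos := collatz_steps a
               acc ++ [[("n", a), ("presion", presion), ("pasos", pasos)]]
             else acc) = acc := by
        by_cases he : a % 2 = 0
        · rw [if_pos (by rw [hm2]; exact he)]
        · have h2 : 2 ≤ get_v2_alt (3 * a + 1) :=
            get_v2_alt_mod4_zero _ (by omega) (by omega)
          rw [if_neg (by rw [hm2]; omega)]
          simp only [get_v2_eq_alt]
          rw [if_neg (by omega)]
      rw [hskip, ih (a + 1) b (by omega), hm4', hm4]
      congr 1
      omega


-- ===== VERDICT (by name: the statement is the Claim_ definition above) =====
theorem analizar_presion_vecindad_spec : Claim_equal_analizar_presion_vecindad := by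
  intro r m _
  unfold Spec_analizar_presion_vecindad analizar_presion_vecindad analizar_presion_vecindad_alt
  exact pv_main (r + m - r).toNat r (r + m) rfl []
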